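-- pv_equiv track=rewrite | github.com/StevenPierre/Advanced-Data-Analytics | String_Processing.py | is_ssn
-- ===== SOURCE A (Python) =====
-- def is_ssn (s):
--     parts = s.split('-')
--     correct_lengths = [3, 2, 4]
--     if len(parts) != len(correct_lengths):
--         return False
--     for p, n in zip(parts, correct_lengths):
--         if not (p.isdigit() and len(p) == n):
--             return False
--     return True
-- ===== SOURCE B (Python) =====
-- def is_ssn(s):
--     return (len(s) == 11 and s[3] == '-' and s[6] == '-'
--             and s[:3].isdigit() and s[4:6].isdigit() and s[7:].isdigit())
-- ===== Notes on version B (the rewrite author's own statement) =====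
-- stated objective: simpler
-- what changed: B drops A's split/zip/loop entirely and validates by fixed character positions: length == 11, dashes at indices 3 and 6, and isdigit on the three fixed slices.
import Mathlib
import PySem

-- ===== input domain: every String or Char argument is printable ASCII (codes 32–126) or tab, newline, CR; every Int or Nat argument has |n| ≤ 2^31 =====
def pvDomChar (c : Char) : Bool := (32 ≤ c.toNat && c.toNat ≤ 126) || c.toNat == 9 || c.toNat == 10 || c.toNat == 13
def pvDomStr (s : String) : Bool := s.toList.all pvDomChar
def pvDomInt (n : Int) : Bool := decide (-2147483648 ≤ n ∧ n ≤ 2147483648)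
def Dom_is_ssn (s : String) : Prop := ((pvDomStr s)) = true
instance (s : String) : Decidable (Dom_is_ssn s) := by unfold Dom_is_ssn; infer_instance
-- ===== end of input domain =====

-- B validates the SSN pattern by fixed character positions (length, the two dashes,
-- three digit slices) instead of A's split-and-zip loop; objective: simpler.

-- ===== PORT A =====
-- the 'for p, n in zip(parts, correct_lengths)' loop with its early return
def pvLoopA : List (String × Int) → Bool
  | [] => true
  | (p, n) :: rest =>
      if !(PySem.Str.strIsdigit p && (PySem.Str.len p == n)) then false else pvLoopA rest

def is_ssn (s : String) : Bool :=
  -- s.split('-'): split? is always `some` here since the separator "-" is nonempty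
  let parts := (PySem.Str.split? s "-").getD []
  let correct_lengths : List Int := [3, 2, 4]
  if PySem.List.len parts != PySem.List.len correct_lengths then false
  else pvLoopA (parts.zip correct_lengths)

-- ===== PORT B =====
def is_ssn_alt (s : String) : Bool :=
  PySem.Str.len s == 11 &&
  (PySem.Str.pyGet? s 3 == some '-') &&
  (PySem.Str.pyGet? s 6 == some '-') &&
  PySem.Str.strIsdigit (PySem.Str.slice s none (some 3)) &&
  PySem.Str.strIsdigit (PySem.Str.slice s (some 4) (some 6)) &&
  PySem.Str.strIsdigit (PySem.Str.slice s (some 7) none)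

-- ===== PRECONDITION & SPEC =====
def Spec_is_ssn (s : String) (out : Bool) : Prop := out = is_ssn_alt s
instance (s : String) (out : Bool) : Decidable (Spec_is_ssn s out) := by unfold Spec_is_ssn; infer_instance

-- ===== CLAIM (what is proved, stated in full; the proofs are below) =====
def Claim_equal_is_ssn : Prop := ∀ (s : String), Dom_is_ssn s → Spec_is_ssn s (is_ssn s)

-- ===== LEMMAS AND PROOFS =====

-- reference single-char split on '-' (proof-side only)
def split1 : List Char → List (List Char)
  | [] => [[]]
  | c :: rest => if c = '-' then [] :: split1 rest else (split1 rest).modifyHead (c :: ·)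

lemma split1_ne_nil (cs : List Char) : split1 cs ≠ [] := by
  induction cs with
  | nil => simp [split1]
  | cons c rest ih =>
    simp only [split1]
    split
    · simp
    · cases h : split1 rest with
      | nil => exact absurd h ih
      | cons a t => simp

lemma splitOn_go_dash (l : List Char) : ∀ (fuel : Nat) (cur : List Char) (acc : List (List Char)),
    l.length < fuel →
    PySem.Chars.splitOn.go ['-'] fuel l cur acc = acc.reverse ++ (split1 l).modifyHead (cur.reverse ++ ·) := by
  induction l with
  | nil =>
    intro fuel cur acc h
    cases fuel with
    | zero => omega
    | succ f => simp [PySem.Chars.splitOn.go, split1]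
  | cons c rest ih =>
    intro fuel cur acc h
    cases fuel with
    | zero => omega
    | succ f =>
      by_cases hc : c = '-'
      · subst hc
        rw [show PySem.Chars.splitOn.go ['-'] (f+1) ('-' :: rest) cur acc
              = PySem.Chars.splitOn.go ['-'] f rest [] (cur.reverse :: acc) by
            simp [PySem.Chars.splitOn.go, List.isPrefixOf]]
        rw [ih f [] (cur.reverse :: acc) (by simpa using h)]
        simp only [split1, if_pos rfl, List.reverse_cons, List.modifyHead_cons,
          List.reverse_nil, List.nil_append, List.append_assoc, List.singleton_append]
        cases hs : split1 rest with
        | nil => exact absurd hs (split1_ne_nil rest)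
        | cons a t => simp
      · rw [show PySem.Chars.splitOn.go ['-'] (f+1) (c :: rest) cur acc
              = PySem.Chars.splitOn.go ['-'] f rest (c :: cur) acc by
            simp [PySem.Chars.splitOn.go, List.isPrefixOf,
              show ¬ '-' = c from fun h => hc h.symm]]
        rw [ih f (c :: cur) acc (by simpa using h)]
        simp only [split1, if_neg hc]
        cases hs : split1 rest with
        | nil => exact absurd hs (split1_ne_nil rest)
        | cons a t => simp

lemma splitOn_dash (cs : List Char) : PySem.Chars.splitOn cs ['-'] = split1 cs := by
  rw [PySem.Chars.splitOn, splitOn_go_dash cs (cs.length + 1) [] [] (by omega)]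
  cases hs : split1 cs with
  | nil => exact absurd hs (split1_ne_nil cs)
  | cons a t => simp

def joinDash : List (List Char) → List Char
  | [] => []
  | [p] => p
  | p :: ps => p ++ '-' :: joinDash ps

lemma joinDash_split1 (cs : List Char) : joinDash (split1 cs) = cs := by
  induction cs with
  | nil => simp [split1, joinDash]
  | cons c rest ih =>
    simp only [split1]
    split
    · rename_i hc
      subst hc
      cases hs : split1 rest with
      | nil => exact absurd hs (split1_ne_nil rest)
      | cons a t =>
        rw [hs] at ih
        cases t <;> simp_all [joinDash]
    · cases hs : split1 rest with
      | nil => exact absurd hs (split1_ne_nil rest)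
      | cons a t =>
        rw [hs] at ih
        cases t <;> simp_all [joinDash]

lemma split1_no_dash (p : List Char) (hp : '-' ∉ p) : split1 p = [p] := by
  induction p with
  | nil => simp [split1]
  | cons c rest ih =>
    simp only [List.mem_cons, not_or] at hp
    rw [split1, if_neg (fun h => hp.1 h.symm), ih hp.2]
    simp

lemma split1_append_dash (p rest : List Char) (hp : '-' ∉ p) :
    split1 (p ++ '-' :: rest) = p :: split1 rest := by
  induction p with
  | nil => simp [split1]
  | cons c q ih =>
    simp only [List.mem_cons, not_or] at hp
    rw [List.cons_append, split1, if_neg (fun h => hp.1 h.symm), ih hp.2]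
    cases hs : split1 rest with
    | nil => exact absurd hs (split1_ne_nil rest)
    | cons a t => simp

lemma nodash_of_strIsdigit (p : List Char) (h : PySem.Chars.strIsdigit p = true) : '-' ∉ p := by
  intro hm
  rw [PySem.Chars.strIsdigit] at h
  simp only [Bool.and_eq_true, List.all_eq_true] at h
  have := h.2 '-' hm
  simp [PySem.Chars.isdigit] at this

lemma loopA3 (p0 p1 p2 : String) :
    pvLoopA [(p0, 3), (p1, 2), (p2, 4)] =
      ((PySem.Str.strIsdigit p0 && (PySem.Str.len p0 == 3)) &&
       (PySem.Str.strIsdigit p1 && (PySem.Str.len p1 == 2)) &&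
       (PySem.Str.strIsdigit p2 && (PySem.Str.len p2 == 4))) := by
  simp only [pvLoopA]
  cases (PySem.Str.strIsdigit p0 && (PySem.Str.len p0 == 3)) <;>
    cases (PySem.Str.strIsdigit p1 && (PySem.Str.len p1 == 2)) <;>
      cases (PySem.Str.strIsdigit p2 && (PySem.Str.len p2 == 4)) <;> simp

lemma hparts_eq (s : String) :
    (PySem.Str.split? s "-").getD [] = (split1 s.toList).map String.ofList := by
  rw [PySem.Str.split?]
  simp [PySem.Chars.split?, splitOn_dash]

lemma main_eq (s : String) : is_ssn s = is_ssn_alt s := by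
  rw [Bool.eq_iff_iff]
  constructor
  · -- A = true → B = true
    intro hA
    rw [is_ssn] at hA
    simp only [hparts_eq] at hA
    split at hA
    · exact absurd hA (by simp)
    · rename_i hlen
      simp only [bne_eq_false_iff_eq, Bool.not_eq_true, bne_eq_false_iff_eq,
        PySem.List.len_eq, List.length_map, List.length_cons, List.length_nil] at hlen
      have h3 : (split1 s.toList).length = 3 := by
        have := hlen
        omega
      obtain ⟨q0, q1, q2, hq⟩ := List.length_eq_three.mp h3
      rw [hq] at hA
      simp only [List.map_cons, List.map_nil, List.zip_cons_cons, List.zip_nil_right] at hA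
      rw [loopA3] at hA
      simp only [Bool.and_eq_true, beq_iff_eq, PySem.Str.strIsdigit_eq,
        String.toList_ofList, PySem.Str.len_eq] at hA
      obtain ⟨⟨⟨hd0, hl0⟩, hd1, hl1⟩, hd2, hl2⟩ := hA
      have l0 : q0.length = 3 := by exact_mod_cast hl0
      have l1 : q1.length = 2 := by exact_mod_cast hl1
      have l2 : q2.length = 4 := by exact_mod_cast hl2
      have hcs : s.toList = q0 ++ '-' :: (q1 ++ '-' :: q2) := by
        conv_lhs => rw [← joinDash_split1 s.toList]
        rw [hq]
        simp [joinDash]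
      obtain ⟨a, b, c, rfl⟩ := List.length_eq_three.mp l0
      obtain ⟨d, e, rfl⟩ := List.length_eq_two.mp l1
      obtain ⟨f, g, h, i, rfl⟩ := List.length_eq_four.mp l2
      simp only [PySem.Chars.strIsdigit, List.all_cons, List.all_nil, List.isEmpty_cons,
        Bool.not_false, Bool.true_and, Bool.and_true, Bool.and_eq_true] at hd0 hd1 hd2
      simp [is_ssn_alt, PySem.Str.len_eq, PySem.Str.pyGet?, PySem.Str.strIsdigit_eq,
        PySem.Str.slice, String.toList_ofList, hcs, PySem.List.pyGet?, PySem.List.pyIdx?,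
        PySem.Chars.strIsdigit, PySem.List.slice_to, PySem.List.slice_from,
        PySem.List.slice_toNat, hd0.1, hd0.2.1, hd0.2.2, hd1.1, hd1.2, hd2.1, hd2.2.1,
        hd2.2.2.1, hd2.2.2.2]
  · -- B = true → A = true
    intro hB
    simp only [is_ssn_alt, Bool.and_eq_true, beq_iff_eq, PySem.Str.len_eq,
      PySem.Str.pyGet?, PySem.Chars.pyGet?_eq_listPyGet?, PySem.Str.strIsdigit_eq,
      PySem.Str.slice, String.toList_ofList, PySem.Chars.slice_eq_listSlice] at hB
    obtain ⟨⟨⟨⟨⟨hlen, hg3⟩, hg6⟩, hd0⟩, hd1⟩, hd2⟩ := hB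
    have hlen' : s.toList.length = 11 := by exact_mod_cast hlen
    rw [PySem.List.slice_to _ (by norm_num)] at hd0
    rw [PySem.List.slice_toNat _ (by norm_num) (by norm_num)] at hd1
    rw [PySem.List.slice_from _ (by norm_num)] at hd2
    rw [PySem.List.pyGet?_of_nonneg _ (by norm_num)] at hg3
    rw [PySem.List.pyGet?_of_nonneg _ (by norm_num)] at hg6
    simp only [show ((3:Int).toNat) = 3 from rfl, show ((4:Int).toNat) = 4 from rfl, show ((6:Int).toNat) = 6 from rfl, show ((7:Int).toNat) = 7 from rfl] at hd0 hd1 hd2 hg3 hg6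
    norm_num at hd1
    rw [List.getElem?_eq_getElem (by omega)] at hg3
    rw [List.getElem?_eq_getElem (by omega)] at hg6
    simp only [Option.some_inj] at hg3 hg6
    have e3 : s.toList.drop 3 = '-' :: s.toList.drop 4 := by
      rw [List.drop_eq_getElem_cons (by omega), hg3]
    have e6 : s.toList.drop 6 = '-' :: s.toList.drop 7 := by
      rw [List.drop_eq_getElem_cons (by omega), hg6]
    have e4 : s.toList.drop 4 = (s.toList.drop 4).take 2 ++ '-' :: s.toList.drop 7 := by
      conv_lhs => rw [← List.take_append_drop 2 (s.toList.drop 4)]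
      rw [List.drop_drop]
      norm_num
      rw [e6]
    have hcs : s.toList
        = s.toList.take 3 ++ '-' :: ((s.toList.drop 4).take 2 ++ '-' :: s.toList.drop 7) := by
      conv_lhs => rw [← List.take_append_drop 3 s.toList, e3, e4]
    have hsplit : split1 s.toList = [s.toList.take 3, (s.toList.drop 4).take 2, s.toList.drop 7] := by
      conv_lhs => rw [hcs]
      rw [split1_append_dash _ _ (nodash_of_strIsdigit _ hd0),
        split1_append_dash _ _ (nodash_of_strIsdigit _ hd1),
        split1_no_dash _ (nodash_of_strIsdigit _ hd2)]
    rw [is_ssn]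
    simp only [hparts_eq, hsplit, List.map_cons, List.map_nil, PySem.List.len_eq,
      List.length_cons, List.length_nil]
    norm_num
    rw [loopA3]
    simp only [Bool.and_eq_true, beq_iff_eq, PySem.Str.strIsdigit_eq,
      String.toList_ofList, PySem.Str.len_eq]
    refine ⟨⟨⟨hd0, ?_⟩, hd1, ?_⟩, hd2, ?_⟩ <;>
      simp [List.length_take, List.length_drop, hlen']

-- ===== VERDICT (by name: the statement is the Claim_ definition above) =====
theorem is_ssn_spec : Claim_equal_is_ssn := by
  intro s _
  unfold Spec_is_ssn
  exact main_eq s
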